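-- pv_equiv track=rewrite | github.com/Senichkaa/lab1-on-python | lab5/rect_generate.py | generate_middle_rectangles
-- ===== SOURCE A (Python) =====
-- def generate_middle_rectangles(width, height, symbol_color):
--     middle_rectangles = []
--     if width > 2 and height > 2:
--         offset = 1
--         for _ in range(height // 2 - 1):
--             rectangle = [
--                 [" " for _ in range(width)] for _ in range(height)
--             ]
--             for i in range(height):
--                 for j in range(width):
--                     if i == 0 and (j == 0 or j == width - 1):
--                         rectangle[i][j] = symbol_color
--                     elif i == height - 1 and j == 0:
--                         rectangle[i][j] = symbol_color
--             middle_rectangles.append((rectangle, offset))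
--             offset += 1
--     return middle_rectangles
-- ===== SOURCE B (Python) =====
-- def generate_middle_rectangles(width, height, symbol_color):
--     if width <= 2 or height <= 2:
--         return []
--     result = []
--     for offset in range(height // 2 - 1, 0, -1):
--         top = [symbol_color] + [" "] * (width - 2) + [symbol_color]
--         bottom = [symbol_color] + [" "] * (width - 1)
--         middle = [[" "] * width for _ in range(height - 2)]
--         result = [([top] + middle + [bottom], offset)] + result
--     return result
-- ===== Notes on version B (the rewrite author's own statement) =====
-- stated objective: alternative
-- what changed: B assembles each grid row-by-role (top row, blank middle block, bottom row built by list concatenation) instead of scanning every (i,j) cell of a blank grid with corner conditionals, and builds the result list back-to-front by prepending over a descending offset range instead of appending with a running counter.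
import Mathlib
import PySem

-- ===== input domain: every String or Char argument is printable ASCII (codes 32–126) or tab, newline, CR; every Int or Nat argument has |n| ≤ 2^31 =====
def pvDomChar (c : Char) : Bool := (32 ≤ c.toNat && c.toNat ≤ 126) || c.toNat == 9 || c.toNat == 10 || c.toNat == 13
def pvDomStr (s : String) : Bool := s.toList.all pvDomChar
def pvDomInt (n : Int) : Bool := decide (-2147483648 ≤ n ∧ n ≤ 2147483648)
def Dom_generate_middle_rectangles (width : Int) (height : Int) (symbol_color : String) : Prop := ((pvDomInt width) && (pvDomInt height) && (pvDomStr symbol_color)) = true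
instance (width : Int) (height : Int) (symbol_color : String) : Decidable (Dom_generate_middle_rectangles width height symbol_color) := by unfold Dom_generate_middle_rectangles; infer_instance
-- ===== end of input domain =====

-- B assembles each grid row-by-role (top / blank middle block / bottom by concatenation)
-- instead of scanning every (i,j) cell with corner conditionals, and builds the result
-- back-to-front over a descending offset range (objective: alternative).

-- ===== PORT A =====
def generate_middle_rectangles (width : Int) (height : Int) (symbol_color : String) : List (List (List String) × Int) :=
  if width > 2 ∧ height > 2 then
    ((List.range (PySem.Int.floordiv height 2 - 1).toNat).foldl
      (fun (st : List (List (List String) × Int) × Int) _ =>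
        let rect0 : List (List String) :=
          List.replicate height.toNat (List.replicate width.toNat " ")
        let rect := (List.range height.toNat).foldl (fun r (i : Nat) =>
          (List.range width.toNat).foldl (fun r (j : Nat) =>
            if i = 0 ∧ (j = 0 ∨ (j : Int) = width - 1) then
              r.modify i (fun row => row.set j symbol_color)
            else if (i : Int) = height - 1 ∧ j = 0 then
              r.modify i (fun row => row.set j symbol_color)
            else r) r) rect0
        (st.1 ++ [(rect, st.2)], st.2 + 1))
      ([], 1)).1
  else []

-- ===== PORT B =====
def generate_middle_rectangles_alt (width : Int) (height : Int) (symbol_color : String) : List (List (List String) × Int) :=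
  if width ≤ 2 ∨ height ≤ 2 then []
  else
    (PySem.List.pyRange (PySem.Int.floordiv height 2 - 1) 0 (-1)).foldl
      (fun (result : List (List (List String) × Int)) offset =>
        let top : List String := [symbol_color] ++ List.replicate (width - 2).toNat " " ++ [symbol_color]
        let bottom : List String := [symbol_color] ++ List.replicate (width - 1).toNat " "
        let middle : List (List String) := List.replicate (height - 2).toNat (List.replicate width.toNat " ")
        [([top] ++ middle ++ [bottom], offset)] ++ result) []

-- ===== PRECONDITION & SPEC =====
def Spec_generate_middle_rectangles (width : Int) (height : Int) (symbol_color : String) (out : List (List (List String) × Int)) : Prop := out = generate_middle_rectangles_alt width height symbol_color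
instance (width : Int) (height : Int) (symbol_color : String) (out : List (List (List String) × Int)) : Decidable (Spec_generate_middle_rectangles width height symbol_color out) := by unfold Spec_generate_middle_rectangles; infer_instance

-- ===== CLAIM (what is proved, stated in full; the proofs are below) =====
def Claim_equal_generate_middle_rectangles : Prop := ∀ (width : Int) (height : Int) (symbol_color : String), Dom_generate_middle_rectangles width height symbol_color → Spec_generate_middle_rectangles width height symbol_color (generate_middle_rectangles width height symbol_color)

-- ===== LEMMAS AND PROOFS =====

-- a fold that conditionally applies f is the same as folding f over the filtered list
theorem pv_foldl_ite {α : Type} (p : Nat → Prop) [DecidablePred p] (f : Nat → α → α) :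
    ∀ (l : List Nat) (r0 : α),
      l.foldl (fun r j => if p j then f j r else r) r0
        = (l.filter (fun j => decide (p j))).foldl (fun r j => f j r) r0 := by
  intro l
  induction l with
  | nil => intro r0; rfl
  | cons a t ih =>
      intro r0
      by_cases h : p a <;> simp [List.foldl_cons, h, ih]

theorem pv_filter_eq_single (a n : Nat) (h : a < n) :
    (List.range n).filter (fun j => decide (j = a)) = [a] := by
  induction n with
  | zero => omega
  | succ m ih =>
      rw [List.range_succ, List.filter_append]
      by_cases hm : a < m
      · rw [ih hm]
        have hne : ¬ (m = a) := by omega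
        simp [hne]
      · have ham : a = m := by omega
        subst ham
        have hnil : (List.range a).filter (fun j => decide (j = a)) = [] := by
          apply List.filter_eq_nil_iff.mpr
          intro x hx
          simp at hx ⊢
          omega
        simp [hnil]

theorem pv_filter_eq_pair (m n : Nat) (h0 : 0 < m) (h : m < n) :
    (List.range n).filter (fun j => decide (j = 0 ∨ j = m)) = [0, m] := by
  induction n with
  | zero => omega
  | succ k ih =>
      rw [List.range_succ, List.filter_append]
      by_cases hk : m < k
      · rw [ih hk]
        have h1 : k ≠ 0 := by omega
        have h2 : k ≠ m := by omega
        simp [h1, h2]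
      · have hkm : k = m := by omega
        subst hkm
        have heq : (List.range k).filter (fun j => decide (j = 0 ∨ j = k))
            = (List.range k).filter (fun j => decide (j = 0)) := by
          apply List.filter_congr
          intro x hx
          simp at hx ⊢
          omega
        rw [heq, pv_filter_eq_single 0 k (by omega)]
        simp

-- a fold whose body fires only at index 0
theorem pv_foldl_one {α : Type} (n : Nat) (F0 : α → α) (h0 : 0 < n) (r0 : α) :
    (List.range n).foldl (fun r i => if i = 0 then F0 r else r) r0 = F0 r0 := by
  have h2 := pv_foldl_ite (fun i : Nat => i = 0) (fun _ r => F0 r) (List.range n) r0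
  rw [pv_filter_eq_single 0 n h0] at h2
  exact h2

-- a fold whose body fires only at indices 0 and m
theorem pv_foldl_two {α : Type} (m n : Nat) (F0 F1 : α → α) (h0 : 0 < m) (h : m < n) (r0 : α) :
    (List.range n).foldl
      (fun r i => if i = 0 ∨ i = m then (if i = 0 then F0 r else F1 r) else r) r0
    = F1 (F0 r0) := by
  have h2 := pv_foldl_ite (fun i : Nat => i = 0 ∨ i = m)
    (fun i r => if i = 0 then F0 r else F1 r) (List.range n) r0
  rw [pv_filter_eq_pair m n h0 h] at h2
  refine h2.trans ?_
  have hm : ¬ (m = 0) := by omega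
  simp [hm]

theorem pv_foldl_id {α β : Type} (l : List β) (r0 : α) :
    l.foldl (fun r _ => r) r0 = r0 := by
  induction l with
  | nil => rfl
  | cons a t ih => simp [ih]

-- the append-with-counter loop is a map over a range
theorem pv_foldl_counter (rect : List (List String)) :
    ∀ (n : Nat) (acc : List (List (List String) × Int)) (c : Int),
      (List.range n).foldl
        (fun (st : List (List (List String) × Int) × Int) _ => (st.1 ++ [(rect, st.2)], st.2 + 1))
        (acc, c)
      = (acc ++ (List.range n).map (fun (k : Nat) => (rect, c + (k : Int))), c + (n : Int)) := by
  intro n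
  induction n with
  | zero => intro acc c; simp
  | succ m ih =>
      intro acc c
      rw [List.range_succ, List.foldl_append, ih]
      simp
      ring

-- A's cell-scanning double loop equals the three corner writes on the blank grid
theorem pv_rect_eq (width height : Int) (s : String)
    (hw : width > 2) (hh : height > 2) :
    (List.range height.toNat).foldl (fun r (i : Nat) =>
        (List.range width.toNat).foldl (fun r (j : Nat) =>
          if i = 0 ∧ (j = 0 ∨ (j : Int) = width - 1) then
            r.modify i (fun row => row.set j s)
          else if (i : Int) = height - 1 ∧ j = 0 then
            r.modify i (fun row => row.set j s)
          else r) r)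
      (List.replicate height.toNat (List.replicate width.toNat " "))
    = (((List.replicate height.toNat (List.replicate width.toNat " ")).modify 0
          (fun row => row.set 0 s)).modify 0
          (fun row => row.set (width - 1).toNat s)).modify (height - 1).toNat
          (fun row => row.set 0 s) := by
  set w : Nat := width.toNat with hwdef
  set h : Nat := height.toNat with hhdef
  have hw3 : 3 ≤ w := by omega
  have hh3 : 3 ≤ h := by omega
  have hw1 : (width - 1).toNat = w - 1 := by omega
  have hh1 : (height - 1).toNat = h - 1 := by omega
  have hcast : ((w - 1 : Nat) : Int) = width - 1 := by omega
  have hcasth : ((h - 1 : Nat) : Int) = height - 1 := by omega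
  have hne : ¬ ((0 : Int) = height - 1) := by omega
  have inner0 : ∀ r : List (List String),
      (List.range w).foldl (fun r (j : Nat) =>
        if (0 : Nat) = 0 ∧ (j = 0 ∨ (j : Int) = width - 1) then
          r.modify 0 (fun row => row.set j s)
        else if ((0 : Nat) : Int) = height - 1 ∧ j = 0 then
          r.modify 0 (fun row => row.set j s)
        else r) r
      = (r.modify 0 (fun row => row.set 0 s)).modify 0 (fun row => row.set (w - 1) s) := by
    intro r
    have hcong : (List.range w).foldl (fun r (j : Nat) =>
        if (0 : Nat) = 0 ∧ (j = 0 ∨ (j : Int) = width - 1) then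
          r.modify 0 (fun row => row.set j s)
        else if ((0 : Nat) : Int) = height - 1 ∧ j = 0 then
          r.modify 0 (fun row => row.set j s)
        else r) r
        = (List.range w).foldl (fun r (j : Nat) =>
            if j = 0 ∨ j = w - 1 then
              (if j = 0 then r.modify 0 (fun row => row.set 0 s)
               else r.modify 0 (fun row => row.set (w - 1) s))
            else r) r := by
      apply PySem.List.foldl_congr_mem
      intro acc x hx
      have hxw : x < w := List.mem_range.mp hx
      have hiff : ((x : Int) = width - 1) ↔ x = w - 1 := by omega
      by_cases hx0 : x = 0
      · simp [hx0]
      · by_cases hxm : x = w - 1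
        · subst hxm
          simp [hx0, hcast]
        · simp [hx0, hxm, hiff, hne]
    rw [hcong]
    exact pv_foldl_two (w - 1) w
      (fun r => r.modify 0 (fun row => row.set 0 s))
      (fun r => r.modify 0 (fun row => row.set (w - 1) s))
      (by omega) (by omega) r
  have innerlast : ∀ r : List (List String),
      (List.range w).foldl (fun r (j : Nat) =>
        if h - 1 = 0 ∧ (j = 0 ∨ (j : Int) = width - 1) then
          r.modify (h - 1) (fun row => row.set j s)
        else if ((h - 1 : Nat) : Int) = height - 1 ∧ j = 0 then
          r.modify (h - 1) (fun row => row.set j s)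
        else r) r
      = r.modify (h - 1) (fun row => row.set 0 s) := by
    intro r
    have h1 : ¬ (h - 1 = 0) := by omega
    have hcong : (List.range w).foldl (fun r (j : Nat) =>
        if h - 1 = 0 ∧ (j = 0 ∨ (j : Int) = width - 1) then
          r.modify (h - 1) (fun row => row.set j s)
        else if ((h - 1 : Nat) : Int) = height - 1 ∧ j = 0 then
          r.modify (h - 1) (fun row => row.set j s)
        else r) r
        = (List.range w).foldl (fun r (j : Nat) =>
            if j = 0 then r.modify (h - 1) (fun row => row.set 0 s) else r) r := by
      apply PySem.List.foldl_congr_mem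
      intro acc x hx
      by_cases hx0 : x = 0
      · simp [h1, hcasth, hx0]
      · simp [h1, hx0]
    rw [hcong]
    exact pv_foldl_one w (fun r => r.modify (h - 1) (fun row => row.set 0 s)) (by omega) r
  have innermid : ∀ (i : Nat) (r : List (List String)), i ≠ 0 → i ≠ h - 1 → i < h →
      (List.range w).foldl (fun r (j : Nat) =>
        if i = 0 ∧ (j = 0 ∨ (j : Int) = width - 1) then
          r.modify i (fun row => row.set j s)
        else if (i : Int) = height - 1 ∧ j = 0 then
          r.modify i (fun row => row.set j s)
        else r) r
      = r := by
    intro i r hi0 hil hih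
    have h2 : ¬ ((i : Int) = height - 1) := by omega
    have hcong : (List.range w).foldl (fun r (j : Nat) =>
        if i = 0 ∧ (j = 0 ∨ (j : Int) = width - 1) then
          r.modify i (fun row => row.set j s)
        else if (i : Int) = height - 1 ∧ j = 0 then
          r.modify i (fun row => row.set j s)
        else r) r
        = (List.range w).foldl (fun r _ => r) r := by
      apply PySem.List.foldl_congr_mem
      intro acc x hx
      simp [hi0, h2]
    rw [hcong, pv_foldl_id]
  have houter : (List.range h).foldl (fun r (i : Nat) =>
        (List.range w).foldl (fun r (j : Nat) =>
          if i = 0 ∧ (j = 0 ∨ (j : Int) = width - 1) then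
            r.modify i (fun row => row.set j s)
          else if (i : Int) = height - 1 ∧ j = 0 then
            r.modify i (fun row => row.set j s)
          else r) r)
      (List.replicate h (List.replicate w " "))
      = (List.range h).foldl (fun r (i : Nat) =>
          if i = 0 ∨ i = h - 1 then
            (if i = 0 then
              (r.modify 0 (fun row => row.set 0 s)).modify 0 (fun row => row.set (w - 1) s)
            else r.modify (h - 1) (fun row => row.set 0 s))
          else r)
        (List.replicate h (List.replicate w " ")) := by
    apply PySem.List.foldl_congr_mem
    intro acc i hi
    have hih : i < h := List.mem_range.mp hi
    by_cases hi0 : i = 0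
    · subst hi0
      rw [inner0 acc]
      simp
    · by_cases hil : i = h - 1
      · subst hil
        rw [innerlast acc]
        simp [hi0]
      · rw [innermid i acc hi0 hil hih]
        simp [hi0, hil]
  rw [hw1, hh1, houter]
  exact pv_foldl_two (h - 1) h
    (fun r => (r.modify 0 (fun row => row.set 0 s)).modify 0 (fun row => row.set (w - 1) s))
    (fun r => r.modify (h - 1) (fun row => row.set 0 s))
    (by omega) (by omega) (List.replicate h (List.replicate w " "))

-- modify at the index just past a prefix rewrites the appended singleton
theorem pv_modify_append_singleton {α : Type} (l : List α) (b : α) (f : α → α) :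
    (l ++ [b]).modify l.length f = l ++ [f b] := by
  induction l with
  | nil => simp
  | cons a t ih => simpa using ih

-- the three corner writes on the blank grid equal B's row-by-role grid
theorem pv_grid_rows (width height : Int) (s : String)
    (hw : width > 2) (hh : height > 2) :
    (((List.replicate height.toNat (List.replicate width.toNat " ")).modify 0
        (fun row => row.set 0 s)).modify 0
        (fun row => row.set (width - 1).toNat s)).modify (height - 1).toNat
        (fun row => row.set 0 s)
    = [[s] ++ List.replicate (width - 2).toNat " " ++ [s]]
        ++ List.replicate (height - 2).toNat (List.replicate width.toNat " ")
        ++ [[s] ++ List.replicate (width - 1).toNat " "] := by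
  obtain ⟨m, hm⟩ : ∃ m, width.toNat = m + 3 := ⟨width.toNat - 3, by omega⟩
  obtain ⟨k, hk⟩ : ∃ k, height.toNat = k + 3 := ⟨height.toNat - 3, by omega⟩
  have hw2 : (width - 2).toNat = m + 1 := by omega
  have hw1 : (width - 1).toNat = m + 2 := by omega
  have hh2 : (height - 2).toNat = k + 1 := by omega
  have hh1 : (height - 1).toNat = k + 2 := by omega
  -- the top row: two sets on the blank row
  have hrow : ∀ x : List String, x = List.replicate (m + 3) " " →
      (x.set 0 s).set (m + 2) s = [s] ++ List.replicate (m + 1) " " ++ [s] := by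
    intro x hx
    subst hx
    rw [List.replicate_succ, List.replicate_succ', List.set_cons_zero,
      show s :: (List.replicate (m + 1) " " ++ [" "]) = (s :: List.replicate (m + 1) " ") ++ [" "] from rfl,
      List.set_append_right _ _ (by simp)]
    simp
  -- the bottom row: one set on the blank row
  have hbot : (List.replicate (m + 3) " ").set 0 s = [s] ++ List.replicate (m + 2) " " := by
    rw [List.replicate_succ, List.set_cons_zero]
    simp
  rw [hm, hk, hw2, hw1, hh2, hh1]
  set r : List String := List.replicate (m + 3) " " with hr
  have hsplit : List.replicate (k + 3) r = r :: (List.replicate (k + 1) r ++ [r]) := by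
    rw [show (k + 3) = (k + 2) + 1 from rfl, List.replicate_succ,
      show (k + 2) = (k + 1) + 1 from rfl, List.replicate_succ']
  rw [hsplit, List.modify_zero_cons, List.modify_zero_cons, List.modify_succ_cons]
  have hmod := pv_modify_append_singleton (List.replicate (k + 1) r) r (fun row => row.set 0 s)
  rw [List.length_replicate] at hmod
  rw [hmod]
  rw [hrow r hr, hbot]
  simp

-- B's prepend loop over the descending range is the ascending map
theorem pv_countdown (g : List (List String)) :
    ∀ (n : Nat) (acc : List (List (List String) × Int)),
      (PySem.List.pyRange (n : Int) 0 (-1)).foldl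
        (fun (result : List (List (List String) × Int)) offset => [(g, offset)] ++ result) acc
      = (List.range n).map (fun (k : Nat) => (g, (k : Int) + 1)) ++ acc := by
  intro n
  induction n with
  | zero =>
      intro acc
      rw [PySem.List.pyRange_neg_one_eq_nil (by omega)]
      simp
  | succ m ih =>
      intro acc
      rw [PySem.List.pyRange_neg_one_cons (by exact_mod_cast Nat.cast_lt.mpr (Nat.succ_pos m))]
      have hcast : ((m + 1 : Nat) : Int) - 1 = (m : Int) := by push_cast; ring
      rw [List.foldl_cons]
      simp only [hcast]
      rw [ih]
      rw [List.range_succ, List.map_append]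
      simp

-- ===== VERDICT (by name: the statement is the Claim_ definition above) =====
theorem generate_middle_rectangles_spec : Claim_equal_generate_middle_rectangles := by
  intro width height symbol_color _
  unfold Spec_generate_middle_rectangles
  by_cases hg : width > 2 ∧ height > 2
  · have hg' : ¬ (width ≤ 2 ∨ height ≤ 2) := by omega
    simp only [generate_middle_rectangles, generate_middle_rectangles_alt, if_pos hg, if_neg hg']
    simp only [pv_rect_eq width height symbol_color hg.1 hg.2,
      pv_grid_rows width height symbol_color hg.1 hg.2]
    have hn : (0 : Int) ≤ PySem.Int.floordiv height 2 - 1 := by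
      have := PySem.Int.floordiv_eq_ediv_of_pos (a := height) (b := 2) (by omega)
      omega
    have hcast : ((PySem.Int.floordiv height 2 - 1).toNat : Int)
        = PySem.Int.floordiv height 2 - 1 := by omega
    rw [pv_foldl_counter, show (PySem.Int.floordiv height 2 - 1)
        = (((PySem.Int.floordiv height 2 - 1).toNat : Nat) : Int) from hcast.symm,
      pv_countdown]
    simp only [List.nil_append, List.append_nil]
    apply List.map_congr_left
    intro k _
    simp
    ring
  · have hg' : width ≤ 2 ∨ height ≤ 2 := by omega
    simp [generate_middle_rectangles, generate_middle_rectangles_alt, hg, hg']
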